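-- pv_equiv track=rewrite | github.com/chenyukii/eval_framework | metrics/classification.py | _to_label_set
-- ===== SOURCE A (Python) =====
-- from typing import Any, Dict, List, Optional, Set
--
-- def _to_label_set(value: Any) -> Set[str]:
--     """
--     将各种形式的标签表示统一转换为标签集合 set[str]。
--
--     约定：
--         - None 或空字符串 -> 空集合
--         - list/tuple/set -> 元素转为字符串后去空格，再放进集合
--         - 普通字符串：
--             - 若包含分号 ';'，按分号切分多标签
--             - 否则认为是单个标签
--         - 其他类型 -> str(value)
--     """
--     if value is None:
--         return set()
--
--     # 已经是列表 / 元组 / 集合：逐个转字符串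
--     if isinstance(value, (list, tuple, set)):
--         result = set()
--         for v in value:
--             s = str(v).strip()
--             if s:
--                 result.add(s)
--         return result
--
--     # 其他情况，先转成字符串
--     s = str(value).strip()
--     if not s:
--         return set()
--
--     # 多标签字符串："car;truck"
--     if ";" in s:
--         return {p.strip() for p in s.split(";") if p.strip()}
--
--     # 单标签
--     return {s}
-- ===== SOURCE B (Python) =====
-- def _scan(s, split_semicolons):
--     # One-pass character scanner: cur holds the token built so far (already
--     # left-stripped); pend holds a run of interior whitespace not yet committed,
--     # so trailing whitespace is never appended and no strip/split call is needed.
--     tokens = []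
--     cur = ""
--     pend = ""
--     for c in s:
--         if split_semicolons and c == ";":
--             if cur:
--                 tokens.append(cur)
--             cur = ""
--             pend = ""
--         elif c.isspace():
--             if cur:
--                 pend += c
--         else:
--             cur += pend + c
--             pend = ""
--     if cur:
--         tokens.append(cur)
--     return tokens
--
-- def _to_label_set(value):
--     if value is None:
--         return set()
--     if isinstance(value, (list, tuple, set)):
--         out = set()
--         for v in value:
--             out.update(_scan(str(v), False))
--         return out
--     return set(_scan(str(value), True))
-- ===== Notes on version B (the rewrite author's own statement) =====
-- stated objective: alternative
-- what changed: Replaces A's staged pipeline (strip the whole string, test emptiness, test ';' membership, then split/strip/filter the pieces) by a single-pass character scanner that never calls strip or split: it builds each label incrementally with a current-token accumulator plus a pending-whitespace buffer, flushing the token at each semicolon separator and at end of input.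
import Mathlib
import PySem

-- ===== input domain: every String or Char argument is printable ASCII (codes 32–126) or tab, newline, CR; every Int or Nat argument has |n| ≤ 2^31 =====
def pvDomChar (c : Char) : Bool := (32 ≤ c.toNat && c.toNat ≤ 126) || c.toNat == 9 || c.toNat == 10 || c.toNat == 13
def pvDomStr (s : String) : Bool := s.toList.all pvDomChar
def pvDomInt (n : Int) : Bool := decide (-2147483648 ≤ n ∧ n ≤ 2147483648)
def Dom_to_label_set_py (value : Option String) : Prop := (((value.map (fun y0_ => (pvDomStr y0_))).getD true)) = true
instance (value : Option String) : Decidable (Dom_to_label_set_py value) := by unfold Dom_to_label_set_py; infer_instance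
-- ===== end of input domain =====

-- B replaces A's strip/membership-test/split pipeline by a single-pass character scanner that
-- builds each label with a cur/pending-whitespace accumulator (objective: alternative).
-- For the Option String argument here, A's isinstance(list/tuple/set) branch can never fire and is omitted from both ports.

-- ===== PORT A =====
def to_label_set_py (value : Option String) : List String :=
  match value with
  | none => PySem.Set.empty
  | some v =>
    let s := PySem.Str.strip v
    if s = "" then PySem.Set.empty
    else if PySem.Str.isIn ";" s then
      PySem.Set.ofList ((((PySem.Str.split? s ";").getD []).map PySem.Str.strip).filter (fun p => p ≠ ""))
    else
      PySem.Set.ofList [s]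

-- ===== PORT B =====
-- the `for c in s` loop of _scan (with split_semicolons = True), state = (tokens, cur, pend);
-- strings are carried as their character lists
def pvScanGo (tokens : List (List Char)) (cur pend : List Char) : List Char → List (List Char)
  | [] => if cur ≠ [] then tokens ++ [cur] else tokens
  | c :: cs =>
    if c = ';' then
      pvScanGo (if cur ≠ [] then tokens ++ [cur] else tokens) [] [] cs
    else if PySem.Chars.isspace c then
      pvScanGo tokens cur (if cur ≠ [] then pend ++ [c] else pend) cs
    else
      pvScanGo tokens (cur ++ pend ++ [c]) [] cs

def to_label_set_py_alt (value : Option String) : List String :=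
  match value with
  | none => PySem.Set.empty
  | some v => PySem.Set.ofList ((pvScanGo [] [] [] v.toList).map String.ofList)

-- ===== PRECONDITION & SPEC =====
def Spec_to_label_set_py (value : Option String) (out : List String) : Prop := out = to_label_set_py_alt value
instance (value : Option String) (out : List String) : Decidable (Spec_to_label_set_py value out) := by unfold Spec_to_label_set_py; infer_instance

-- ===== CLAIM (what is proved, stated in full; the proofs are below) =====
def Claim_equal_to_label_set_py : Prop := ∀ (value : Option String), Dom_to_label_set_py value → Spec_to_label_set_py value (to_label_set_py value)

-- ===== LEMMAS AND PROOFS =====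

-- Splitting a list of chars on a single separator char, written as clean structural recursion.
def split1 (c : Char) : List Char → List (List Char)
  | [] => [[]]
  | x :: xs =>
    if x = c then [] :: split1 c xs
    else
      match split1 c xs with
      | [] => [[x]]
      | h :: t => (x :: h) :: t

theorem split1_ne_nil (c : Char) (s : List Char) : split1 c s ≠ [] := by
  cases s with
  | nil => simp [split1]
  | cons x xs =>
    simp only [split1]
    split
    · simp
    · split <;> simp

theorem go_spec (c : Char) (fuel : Nat) (l cur : List Char) (acc : List (List Char))
    (h : l.length ≤ fuel) :
    PySem.Chars.splitOn.go [c] fuel l cur acc =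
      acc.reverse ++ (match split1 c l with
        | [] => []
        | hd :: t => (cur.reverse ++ hd) :: t) := by
  induction fuel generalizing l cur acc with
  | zero =>
    have : l = [] := by cases l <;> simp_all
    subst this
    simp [PySem.Chars.splitOn.go, split1]
  | succ fuel ih =>
    cases l with
    | nil => simp [PySem.Chars.splitOn.go, split1]
    | cons x rest =>
      have hpre : [c].isPrefixOf (x :: rest) = (c == x) := by
        simp [List.isPrefixOf]
      by_cases hx : x = c
      · subst hx
        have h1 : PySem.Chars.splitOn.go [x] (fuel + 1) (x :: rest) cur acc =
            PySem.Chars.splitOn.go [x] fuel rest [] (cur.reverse :: acc) := by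
          simp [PySem.Chars.splitOn.go, hpre]
        rw [h1, ih rest [] (cur.reverse :: acc) (by simpa using Nat.le_of_succ_le_succ h)]
        obtain ⟨hd, t, hsp⟩ : ∃ hd t, split1 x rest = hd :: t := by
          cases hh : split1 x rest with
          | nil => exact absurd hh (split1_ne_nil x rest)
          | cons a b => exact ⟨a, b, rfl⟩
        simp [split1, hsp]
      · have h1 : PySem.Chars.splitOn.go [c] (fuel + 1) (x :: rest) cur acc =
            PySem.Chars.splitOn.go [c] fuel rest (x :: cur) acc := by
          have : (c == x) = false := by simp [Ne.symm hx]
          simp [PySem.Chars.splitOn.go, hpre, this]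
        rw [h1, ih rest (x :: cur) acc (by simpa using Nat.le_of_succ_le_succ h)]
        obtain ⟨hd, t, hsp⟩ : ∃ hd t, split1 c rest = hd :: t := by
          cases hh : split1 c rest with
          | nil => exact absurd hh (split1_ne_nil c rest)
          | cons a b => exact ⟨a, b, rfl⟩
        simp [split1, hx, hsp]

theorem splitOn_eq_split1 (c : Char) (s : List Char) :
    PySem.Chars.splitOn s [c] = split1 c s := by
  unfold PySem.Chars.splitOn
  rw [go_spec c (s.length + 1) s [] [] (by omega)]
  obtain ⟨hd, t, hsp⟩ : ∃ hd t, split1 c s = hd :: t := by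
    cases hh : split1 c s with
    | nil => exact absurd hh (split1_ne_nil c s)
    | cons a b => exact ⟨a, b, rfl⟩
  simp [hsp]

theorem strip_cons_space {x : Char} (hx : PySem.Chars.isspace x = true) (h : List Char) :
    PySem.Chars.strip (x :: h) = PySem.Chars.strip h := by
  simp [PySem.Chars.strip, PySem.Chars.lstrip, hx]

theorem rstrip_snoc_space {x : Char} (hx : PySem.Chars.isspace x = true) (h : List Char) :
    PySem.Chars.rstrip (h ++ [x]) = PySem.Chars.rstrip h := by
  simp [PySem.Chars.rstrip, hx]

theorem lstrip_cons_nospace {x : Char} (hx : PySem.Chars.isspace x = false) (h : List Char) :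
    PySem.Chars.lstrip (x :: h) = x :: h := by
  simp [PySem.Chars.lstrip, hx]

theorem rstrip_snoc_nospace {x : Char} (hx : PySem.Chars.isspace x = false) (h : List Char) :
    PySem.Chars.rstrip (h ++ [x]) = h ++ [x] := by
  simp [PySem.Chars.rstrip, hx]

theorem head_nospace_of_lstrip_fixed {x : Char} {h : List Char}
    (hfix : PySem.Chars.lstrip (x :: h) = x :: h) : PySem.Chars.isspace x = false := by
  by_contra hc
  have hx : PySem.Chars.isspace x = true := by
    cases hval : PySem.Chars.isspace x
    · exact absurd hval hc
    · rfl
  simp only [PySem.Chars.lstrip, List.dropWhile_cons, hx, if_pos] at hfix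
  have hlen := congrArg List.length hfix
  have hle := List.length_dropWhile_le (p := PySem.Chars.isspace) (l := h)
  simp at hlen
  omega

theorem rstrip_append_spaces {p : List Char} (hp : ∀ c ∈ p, PySem.Chars.isspace c = true)
    (xs : List Char) : PySem.Chars.rstrip (xs ++ p) = PySem.Chars.rstrip xs := by
  induction p using List.reverseRecOn with
  | nil => simp
  | append_singleton q c ih =>
    have hc : PySem.Chars.isspace c = true := hp c (by simp)
    rw [← List.append_assoc, rstrip_snoc_space hc, ih (fun d hd => hp d (by simp [hd]))]

theorem strip_fixed {cur pend : List Char}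
    (h1 : PySem.Chars.lstrip cur = cur) (h2 : PySem.Chars.rstrip cur = cur)
    (h3 : cur = [] → pend = []) (h4 : ∀ c ∈ pend, PySem.Chars.isspace c = true) :
    PySem.Chars.strip (cur ++ pend) = cur := by
  cases cur with
  | nil => rw [h3 rfl]; rfl
  | cons a t =>
    have ha : PySem.Chars.isspace a = false := head_nospace_of_lstrip_fixed h1
    show PySem.Chars.rstrip (PySem.Chars.lstrip ((a :: t) ++ pend)) = a :: t
    rw [List.cons_append, lstrip_cons_nospace ha, ← List.cons_append,
      rstrip_append_spaces h4, h2]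

-- the spec-level token list for the remaining input, given the scanner's state
def pvScanRhs (cur pend cs : List Char) : List (List Char) :=
  (PySem.Chars.strip (cur ++ pend ++ (split1 ';' cs).headI)
    :: ((split1 ';' cs).tail).map PySem.Chars.strip).filter (fun l => l ≠ [])

theorem flush_eq (tokens : List (List Char)) (cur : List Char) :
    (if cur ≠ [] then tokens ++ [cur] else tokens) =
      tokens ++ List.filter (fun l => l ≠ []) [cur] := by
  by_cases h : cur = [] <;> simp [h]

theorem pvScanGo_spec (cs : List Char) : ∀ (tokens : List (List Char)) (cur pend : List Char),
    PySem.Chars.lstrip cur = cur → PySem.Chars.rstrip cur = cur →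
    (cur = [] → pend = []) → (∀ c ∈ pend, PySem.Chars.isspace c = true) →
    pvScanGo tokens cur pend cs = tokens ++ pvScanRhs cur pend cs := by
  induction cs with
  | nil =>
    intro tokens cur pend h1 h2 h3 h4
    have hs : PySem.Chars.strip (cur ++ pend) = cur := strip_fixed h1 h2 h3 h4
    show (if cur ≠ [] then tokens ++ [cur] else tokens) = tokens ++ pvScanRhs cur pend []
    rw [flush_eq]
    simp [pvScanRhs, split1, hs]
  | cons c cs ih =>
    intro tokens cur pend h1 h2 h3 h4
    obtain ⟨hd, t, hsp⟩ : ∃ hd t, split1 ';' cs = hd :: t := by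
      cases hh : split1 ';' cs with
      | nil => exact absurd hh (split1_ne_nil ';' cs)
      | cons a b => exact ⟨a, b, rfl⟩
    by_cases hc : c = ';'
    · subst hc
      have hh : split1 ';' (';' :: cs) = [] :: split1 ';' cs := by simp [split1]
      have hsf : PySem.Chars.strip (cur ++ pend) = cur := strip_fixed h1 h2 h3 h4
      have hstep : pvScanGo tokens cur pend (';' :: cs) =
          pvScanGo (if cur ≠ [] then tokens ++ [cur] else tokens) [] [] cs := by
        simp [pvScanGo]
      rw [hstep, ih _ [] [] rfl rfl (fun _ => rfl) (by simp)]
      simp only [pvScanRhs, hh, hsp, List.headI, List.tail_cons, List.nil_append,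
        List.append_nil, List.map_cons, hsf]
      by_cases hc0 : cur = []
      · subst hc0; simp [List.filter_cons]
      · simp [List.filter_cons, hc0, List.append_assoc]
    · have hhead : split1 ';' (c :: cs) = (c :: hd) :: t := by
        simp [split1, hc, hsp]
      by_cases hsc : PySem.Chars.isspace c = true
      · by_cases hcur : cur = []
        · subst hcur
          have hp : pend = [] := h3 rfl
          subst hp
          have hstep : pvScanGo tokens [] [] (c :: cs) = pvScanGo tokens [] [] cs := by
            simp [pvScanGo, hc, hsc]
          rw [hstep, ih _ [] [] rfl rfl (fun _ => rfl) (by simp)]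
          simp only [pvScanRhs, hhead, hsp, List.headI, List.tail_cons, List.nil_append]
          rw [strip_cons_space hsc]
        · have hstep : pvScanGo tokens cur pend (c :: cs) =
              pvScanGo tokens cur (pend ++ [c]) cs := by
            simp [pvScanGo, hc, hsc, hcur]
          rw [hstep, ih _ cur (pend ++ [c]) h1 h2 (fun h => absurd h hcur)
            (by intro d hd'; rcases List.mem_append.mp hd' with h | h
                · exact h4 d h
                · simp at h; subst h; exact hsc)]
          simp only [pvScanRhs, hhead, hsp, List.headI, List.tail_cons]
          have : cur ++ (pend ++ [c]) ++ hd = cur ++ pend ++ (c :: hd) := by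
            simp
          rw [this]
      · have hsc' : PySem.Chars.isspace c = false := by
          cases hval : PySem.Chars.isspace c
          · rfl
          · exact absurd hval hsc
        have hstep : pvScanGo tokens cur pend (c :: cs) =
            pvScanGo tokens (cur ++ pend ++ [c]) [] cs := by
          simp [pvScanGo, hc, hsc]
        have hl1 : PySem.Chars.lstrip (cur ++ pend ++ [c]) = cur ++ pend ++ [c] := by
          cases cur with
          | nil => rw [h3 rfl]; simpa using lstrip_cons_nospace hsc' []
          | cons a u =>
            have ha : PySem.Chars.isspace a = false := head_nospace_of_lstrip_fixed h1
            simpa using lstrip_cons_nospace ha (u ++ pend ++ [c])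
        have hl2 : PySem.Chars.rstrip (cur ++ pend ++ [c]) = cur ++ pend ++ [c] :=
          rstrip_snoc_nospace hsc' (cur ++ pend)
        rw [hstep, ih _ (cur ++ pend ++ [c]) [] hl1 hl2 (by simp) (by simp)]
        simp only [pvScanRhs, hhead, hsp, List.headI, List.tail_cons]
        have : cur ++ pend ++ [c] ++ ([] : List Char) ++ hd = cur ++ pend ++ (c :: hd) := by
          simp
        rw [this]

theorem pvScanGo_tokens (cs : List Char) :
    pvScanGo [] [] [] cs = ((split1 ';' cs).map PySem.Chars.strip).filter (fun l => l ≠ []) := by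
  rw [pvScanGo_spec cs [] [] [] rfl rfl (fun _ => rfl) (by simp)]
  obtain ⟨hd, t, hsp⟩ : ∃ hd t, split1 ';' cs = hd :: t := by
    cases hh : split1 ';' cs with
    | nil => exact absurd hh (split1_ne_nil ';' cs)
    | cons a b => exact ⟨a, b, rfl⟩
  simp [pvScanRhs, hsp]

-- append a char to the LAST block of a split
def appLast (x : Char) : List (List Char) → List (List Char)
  | [] => []
  | [h] => [h ++ [x]]
  | h :: h' :: t => h :: appLast x (h' :: t)

theorem split1_snoc (c x : Char) (xs : List Char) :
    split1 c (xs ++ [x]) =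
      if x = c then split1 c xs ++ [[]] else appLast x (split1 c xs) := by
  induction xs with
  | nil => by_cases hx : x = c <;> simp [split1, appLast, hx]
  | cons y ys ih =>
    obtain ⟨hd, t, hsp⟩ : ∃ hd t, split1 c ys = hd :: t := by
      cases hh : split1 c ys with
      | nil => exact absurd hh (split1_ne_nil c ys)
      | cons a b => exact ⟨a, b, rfl⟩
    by_cases hx : x = c
    · subst hx
      rw [if_pos rfl] at ih ⊢
      by_cases hy : y = x <;> cases t <;>
        simp [List.cons_append, split1, hy, ih, hsp]
    · simp only [if_neg hx] at ih ⊢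
      by_cases hy : y = c <;> cases t <;>
        simp [List.cons_append, split1, hy, ih, hsp, appLast]

theorem strip_snoc_space {x : Char} (hx : PySem.Chars.isspace x = true) (h : List Char) :
    PySem.Chars.strip (h ++ [x]) = PySem.Chars.strip h := by
  unfold PySem.Chars.strip PySem.Chars.lstrip
  rw [List.dropWhile_append]
  by_cases he : (List.dropWhile PySem.Chars.isspace h).isEmpty = true
  · simp [hx, List.isEmpty_iff.mp he]
  · rw [if_neg he]
    exact rstrip_snoc_space hx _

theorem map_strip_appLast {x : Char} (hx : PySem.Chars.isspace x = true) (l : List (List Char)) :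
    (appLast x l).map PySem.Chars.strip = l.map PySem.Chars.strip := by
  induction l with
  | nil => rfl
  | cons h t ih =>
    cases t with
    | nil => simp [appLast, strip_snoc_space hx]
    | cons h' t' => simpa [appLast] using ih

theorem map_strip_split1_lstrip {c : Char} (hc : PySem.Chars.isspace c = false) (v : List Char) :
    (split1 c (PySem.Chars.lstrip v)).map PySem.Chars.strip = (split1 c v).map PySem.Chars.strip := by
  induction v with
  | nil => rfl
  | cons x xs ih =>
    by_cases hx : PySem.Chars.isspace x = true
    · have hlx : PySem.Chars.lstrip (x :: xs) = PySem.Chars.lstrip xs := by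
        simp [PySem.Chars.lstrip, hx]
      have hxc : x ≠ c := by intro h; rw [h] at hx; simp [hc] at hx
      obtain ⟨hd, t, hsp⟩ : ∃ hd t, split1 c xs = hd :: t := by
        cases hh : split1 c xs with
        | nil => exact absurd hh (split1_ne_nil c xs)
        | cons a b => exact ⟨a, b, rfl⟩
      rw [hlx, ih]
      simp [split1, hxc, hsp, strip_cons_space hx]
    · have : PySem.Chars.lstrip (x :: xs) = x :: xs := by
        simp [PySem.Chars.lstrip, Bool.eq_false_iff.mpr hx]
      rw [this]

theorem map_strip_split1_rstrip {c : Char} (hc : PySem.Chars.isspace c = false) (v : List Char) :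
    (split1 c (PySem.Chars.rstrip v)).map PySem.Chars.strip = (split1 c v).map PySem.Chars.strip := by
  induction v using List.reverseRecOn with
  | nil => rfl
  | append_singleton xs x ih =>
    by_cases hx : PySem.Chars.isspace x = true
    · have hxc : x ≠ c := by intro h; rw [h] at hx; simp [hc] at hx
      rw [rstrip_snoc_space hx, ih, split1_snoc, if_neg hxc, map_strip_appLast hx]
    · have : PySem.Chars.rstrip (xs ++ [x]) = xs ++ [x] := by
        simp [PySem.Chars.rstrip, Bool.eq_false_iff.mpr hx]
      rw [this]

theorem key_chars (v : List Char) :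
    (split1 ';' (PySem.Chars.strip v)).map PySem.Chars.strip = (split1 ';' v).map PySem.Chars.strip := by
  have hc : PySem.Chars.isspace ';' = false := by decide
  unfold PySem.Chars.strip
  calc (split1 ';' (PySem.Chars.rstrip (PySem.Chars.lstrip v))).map PySem.Chars.strip
      = (split1 ';' (PySem.Chars.lstrip v)).map PySem.Chars.strip := map_strip_split1_rstrip hc _
    _ = (split1 ';' v).map PySem.Chars.strip := map_strip_split1_lstrip hc v

theorem split1_no_mem {c : Char} {s : List Char} (h : c ∉ s) : split1 c s = [s] := by
  induction s with
  | nil => rfl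
  | cons x xs ih =>
    have hx : x ≠ c := fun hh => h (by simp [hh])
    have := ih (fun hh => h (List.mem_cons_of_mem x hh))
    simp [split1, hx, this]

theorem lstrip_rstrip_lstrip (s : List Char) :
    PySem.Chars.lstrip (PySem.Chars.rstrip (PySem.Chars.lstrip s)) =
      PySem.Chars.rstrip (PySem.Chars.lstrip s) := by
  set u := PySem.Chars.lstrip s with hu
  have hlu : PySem.Chars.lstrip u = u := by
    simp [hu, PySem.Chars.lstrip, List.dropWhile_idempotent]
  have hpre : PySem.Chars.rstrip u <+: u := by
    have := List.dropWhile_suffix (l := u.reverse) (p := PySem.Chars.isspace)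
    have h2 : (List.dropWhile PySem.Chars.isspace u.reverse).reverse <+: u.reverse.reverse :=
      List.reverse_prefix.mpr this
    simpa [PySem.Chars.rstrip] using h2
  obtain ⟨t, ht⟩ := hpre
  cases hr : PySem.Chars.rstrip u with
  | nil => simp [PySem.Chars.lstrip]
  | cons a b =>
    rw [hr] at ht
    have ha : PySem.Chars.isspace a = false := by
      have : u = a :: (b ++ t) := by rw [← ht]; simp
      rw [this] at hlu
      by_contra hcon
      have : PySem.Chars.isspace a = true := by
        cases hval : PySem.Chars.isspace a
        · exact absurd hval hcon
        · rfl
      simp [PySem.Chars.lstrip, this] at hlu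
      have hlen := congrArg List.length hlu
      rw [List.length_cons] at hlen
      have hle := List.length_dropWhile_le (p := PySem.Chars.isspace) (l := b ++ t)
      omega
    simp [PySem.Chars.lstrip, ha]

theorem strip_idem (s : List Char) : PySem.Chars.strip (PySem.Chars.strip s) = PySem.Chars.strip s := by
  show PySem.Chars.rstrip (PySem.Chars.lstrip (PySem.Chars.rstrip (PySem.Chars.lstrip s)))
      = PySem.Chars.rstrip (PySem.Chars.lstrip s)
  rw [lstrip_rstrip_lstrip]
  simp [PySem.Chars.rstrip, List.dropWhile_idempotent]

-- the filtered, stripped parts of the split, at String level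
def partsS (v : String) : List String :=
  (((PySem.Str.split? v ";").getD []).map PySem.Str.strip).filter (fun p => p ≠ "")

theorem partsS_eq (v : String) :
    partsS v =
      (((split1 ';' v.toList).map PySem.Chars.strip).filter (fun l => l ≠ [])).map String.ofList := by
  have h1 : PySem.Str.split? v ";" =
      some ((split1 ';' v.toList).map String.ofList) := by
    simp [PySem.Str.split?, PySem.Chars.split?, splitOn_eq_split1]
  have hcomp : PySem.Str.strip ∘ String.ofList = String.ofList ∘ PySem.Chars.strip := by
    funext l
    simp [PySem.Str.strip, String.toList_ofList]
  rw [partsS, h1]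
  simp only [Option.getD_some, List.map_map]
  rw [hcomp, ← List.map_map, List.filter_map]
  congr 1
  apply List.filter_congr
  intro l _
  simp [Function.comp]

theorem partsS_strip (v : String) : partsS (PySem.Str.strip v) = partsS v := by
  rw [partsS_eq, partsS_eq]
  have : (PySem.Str.strip v).toList = PySem.Chars.strip v.toList := PySem.Str.toList_strip v
  rw [this, key_chars]

theorem ofList_toList_eq_nil_iff (s : String) : s = "" ↔ s.toList = [] := by
  constructor
  · intro h; rw [h]; simp
  · intro h
    have := congrArg String.ofList h
    simpa [String.ofList_toList] using this

theorem A_eq_parts (v : String) :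
    to_label_set_py (some v) = PySem.Set.ofList (partsS v) := by
  rw [← partsS_strip v]
  unfold to_label_set_py
  simp only
  set s := PySem.Str.strip v with hs
  by_cases h0 : s = ""
  · rw [if_pos h0]
    have : partsS s = [] := by
      rw [partsS_eq]
      have : s.toList = [] := (ofList_toList_eq_nil_iff s).mp h0
      simp [this, split1, PySem.Chars.strip, PySem.Chars.lstrip, PySem.Chars.rstrip]
    rw [this]; rfl
  · rw [if_neg h0]
    by_cases hin : PySem.Str.isIn ";" s = true
    · rw [if_pos hin]; rfl
    · rw [if_neg hin]
      have hnotin : (';' : Char) ∉ s.toList := by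
        have h1 : PySem.Chars.isIn ";".toList s.toList = false := by
          rw [← PySem.Str.isIn_eq]; simpa using hin
        have h2 : ¬ ([';'] <:+: s.toList) := (PySem.Chars.isIn_eq_false_iff _ _).mp h1
        intro hmem
        exact h2 ((List.singleton_infix_iff ';' s.toList).mpr hmem)
      have hstrips : PySem.Chars.strip s.toList = s.toList := by
        rw [hs, PySem.Str.toList_strip, strip_idem]
      have hne : s.toList ≠ [] := fun hh => h0 ((ofList_toList_eq_nil_iff s).mpr hh)
      have : partsS s = [s] := by
        rw [partsS_eq, split1_no_mem hnotin]
        simp [hstrips, hne, String.ofList_toList]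
      rw [this]

theorem B_eq_parts (v : String) :
    to_label_set_py_alt (some v) = PySem.Set.ofList (partsS v) := by
  show PySem.Set.ofList ((pvScanGo [] [] [] v.toList).map String.ofList) = _
  rw [pvScanGo_tokens, ← partsS_eq]

theorem to_label_set_py_eq (value : Option String) :
    to_label_set_py value = to_label_set_py_alt value := by
  cases value with
  | none => rfl
  | some v => rw [A_eq_parts, B_eq_parts]

-- ===== VERDICT (by name: the statement is the Claim_ definition above) =====
theorem to_label_set_py_spec : Claim_equal_to_label_set_py := by
  intro value _
  unfold Spec_to_label_set_py
  exact to_label_set_py_eq value
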